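-- pv_equiv track=rewrite | github.com/Cyp2C19/projet-assemblage | assembly.py | creerCx
-- ===== SOURCE A (Python) =====
-- def creerCx(X):
--     Cx = [];
--     cmpS = 0;  # Compteur de lettre plus petite que $
--     cmpA = 0;
--     cmpC = 0;
--     cmpG = 0;
--     cmpT = 0;
--
--     for i in X:
--         if i < '$':
--             cmpS = cmpS + 1;
--         if i < 'A':
--             cmpA = cmpA + 1;
--         if i < 'C':
--             cmpC = cmpC + 1;
--         if i < 'G':
--             cmpG = cmpG + 1;
--         if i < 'T':
--             cmpT = cmpT + 1;
--
--     Cx.append(cmpS + 1);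
--     Cx.append(cmpA + 1);
--     Cx.append(cmpC + 1);
--     Cx.append(cmpG + 1);
--     Cx.append(cmpT + 1);
--
--     return Cx;
-- ===== SOURCE B (Python) =====
-- def creerCx(X):
--     # Phase 1: tabulate character frequencies in one pass.
--     freq = {}
--     for ch in X:
--         freq[ch] = freq.get(ch, 0) + 1
--     # Phase 2: for each threshold, aggregate over the distinct keys.
--     return [1 + sum(n for k, n in freq.items() if k < t) for t in '$ACGT']
-- ===== Notes on version B (the rewrite author's own statement) =====
-- stated objective: alternative
-- what changed: A makes five threshold comparisons per character in a single pass; B first tabulates character frequencies in a dict in one pass, then computes each of the five results by summing the frequencies of the distinct keys below that threshold.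
import Mathlib
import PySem

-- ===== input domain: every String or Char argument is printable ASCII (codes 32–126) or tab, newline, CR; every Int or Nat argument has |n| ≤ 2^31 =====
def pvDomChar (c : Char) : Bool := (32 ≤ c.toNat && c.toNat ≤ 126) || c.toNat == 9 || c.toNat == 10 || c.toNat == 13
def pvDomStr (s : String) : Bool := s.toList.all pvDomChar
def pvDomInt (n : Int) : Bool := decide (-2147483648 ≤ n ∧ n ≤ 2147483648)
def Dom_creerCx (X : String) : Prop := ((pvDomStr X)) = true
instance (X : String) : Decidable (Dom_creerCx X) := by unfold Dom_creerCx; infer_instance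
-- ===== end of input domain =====

-- B replaces A's five-comparisons-per-character single pass by a two-phase tabulate-then-aggregate
-- decomposition (frequency dict first, then per-threshold sums over distinct keys); same result.

-- ===== PORT A =====
-- one pass; five Int counters updated per character, in A's branch order
def creerCx (X : String) : List Int :=
  let r := X.toList.foldl
    (fun (acc : Int × Int × Int × Int × Int) i =>
      (if i < '$' then acc.1 + 1 else acc.1,
       if i < 'A' then acc.2.1 + 1 else acc.2.1,
       if i < 'C' then acc.2.2.1 + 1 else acc.2.2.1,
       if i < 'G' then acc.2.2.2.1 + 1 else acc.2.2.2.1,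
       if i < 'T' then acc.2.2.2.2 + 1 else acc.2.2.2.2))
    (0, 0, 0, 0, 0)
  [r.1 + 1, r.2.1 + 1, r.2.2.1 + 1, r.2.2.2.1 + 1, r.2.2.2.2 + 1]

-- ===== PORT B =====
-- phase 1: frequency dict; phase 2: per threshold, sum the frequencies of keys below it
def creerCx_alt (X : String) : List Int :=
  let freq := X.toList.foldl
    (fun (d : PySem.Dict Char Int) ch => d.insert ch (d.getD ch 0 + 1)) PySem.Dict.empty
  "$ACGT".toList.map (fun t =>
    1 + ((freq.items.filter (fun p => p.1 < t)).map (·.2)).sum)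

-- ===== PRECONDITION & SPEC =====
def Spec_creerCx (X : String) (out : List Int) : Prop := out = creerCx_alt X
instance (X : String) (out : List Int) : Decidable (Spec_creerCx X out) := by unfold Spec_creerCx; infer_instance

-- ===== CLAIM (what is proved, stated in full; the proofs are below) =====
def Claim_equal_creerCx : Prop := ∀ (X : String), Dom_creerCx X → Spec_creerCx X (creerCx X)

-- ===== LEMMAS AND PROOFS =====

-- A's fold adds, to each starting counter, the number of characters below its threshold
theorem creerCx_foldl_eq (cs : List Char) (s a c g t : Int) :
    cs.foldl
      (fun (acc : Int × Int × Int × Int × Int) i =>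
        (if i < '$' then acc.1 + 1 else acc.1,
         if i < 'A' then acc.2.1 + 1 else acc.2.1,
         if i < 'C' then acc.2.2.1 + 1 else acc.2.2.1,
         if i < 'G' then acc.2.2.2.1 + 1 else acc.2.2.2.1,
         if i < 'T' then acc.2.2.2.2 + 1 else acc.2.2.2.2))
      (s, a, c, g, t)
    = (s + (cs.countP (· < '$') : Int), a + (cs.countP (· < 'A') : Int),
       c + (cs.countP (· < 'C') : Int), g + (cs.countP (· < 'G') : Int),
       t + (cs.countP (· < 'T') : Int)) := by
  induction cs generalizing s a c g t with
  | nil => simp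
  | cons x xs ih =>
    simp only [List.foldl_cons]
    rw [ih]
    simp only [List.countP_cons, decide_eq_true_eq, Prod.mk.injEq]
    refine ⟨?_, ?_, ?_, ?_, ?_⟩ <;> split_ifs <;> push_cast <;> omega

-- summing the multiplicities of the distinct keys below a threshold counts the characters below it
theorem sum_countKeys (cs : List Char) (th : Char) :
    (((PySem.Set.ofList cs).filter (fun k => k < th)).map
        (fun k => (cs.count k : Int))).sum
      = (cs.countP (· < th) : Int) := by
  have hperm : (PySem.Set.ofList cs).Perm cs.dedup := by
    apply List.Perm.symm
    apply (List.perm_ext_iff_of_nodup (List.nodup_dedup cs) (PySem.Set.nodup_ofList cs)).2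
    intro x
    simp [List.mem_dedup, PySem.Set.mem_ofList]
  have h2 := (hperm.filter (fun k => decide (k < th))).map (fun k => (cs.count k : Int))
  rw [List.Perm.sum_eq h2]
  have h4 : (List.map (fun k => ((cs.count k : Int))) (List.filter (fun k => decide (k < th)) cs.dedup))
       = List.map Nat.cast (List.map (fun k => cs.count k) (List.filter (fun k => decide (k < th)) cs.dedup)) := by
    rw [List.map_map]; rfl
  rw [h4, ← Nat.cast_list_sum,
      List.sum_map_count_dedup_filter_eq_countP (fun k => decide (k < th)) cs]

-- B's per-threshold aggregate over the counter's items equals the direct count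
theorem alt_entry_eq (cs : List Char) (th : Char) :
    1 + ((((PySem.Dict.counter cs : PySem.Dict Char Int)).items.filter
            (fun p => p.1 < th)).map (·.2)).sum
      = 1 + (cs.countP (· < th) : Int) := by
  rw [PySem.Dict.items_counter]
  rw [List.filter_map, List.map_map]
  have h : ((PySem.Set.ofList cs).filter
      ((fun p : Char × Int => decide (p.1 < th)) ∘ fun k => (k, (cs.count k : Int)))) =
      ((PySem.Set.ofList cs).filter (fun k => decide (k < th))) := by
    apply List.filter_congr; intro x _; rfl
  rw [h, ← sum_countKeys cs th]
  rfl

-- ===== VERDICT (by name: the statement is the Claim_ definition above) =====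
theorem creerCx_spec : Claim_equal_creerCx := by
  intro X _
  unfold Spec_creerCx creerCx creerCx_alt
  rw [PySem.Dict.foldl_insert_getD_add_one_eq_counter]
  rw [creerCx_foldl_eq]
  have hs : "$ACGT".toList = ['$', 'A', 'C', 'G', 'T'] := rfl
  rw [hs]
  simp only [List.map_cons, List.map_nil, alt_entry_eq]
  simp [add_comm]
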